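-- pv_equiv track=rewrite | github.com/liza0525/algorithm-study | Programmers/weekly_challenge/week5_vowel_dictionary.py | solution
-- ===== SOURCE A (Python) =====
-- def solution(word):
--     def get_added_number(n, vowel):
--         i = 0
--         added_number = 1
--         while i < 4 - n:
--             added_number = added_number * 5 + 1
--             i += 1
--         added_number *= vowel_dict[vowel]
--         return added_number
--
--     answer = len(word)
--     vowel_dict = {
--         'E': 1, 'I': 2, 'O': 3, 'U': 4,
--     }
--
--     for i, vowel in enumerate(word):
--         if vowel == 'A':
--             continue
--         answer += get_added_number(i, vowel)
--
--     return answer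
-- ===== SOURCE B (Python) =====
-- VOWELS = "AEIOU"
--
-- def solution(word):
--     total = len(word)
--     w = 781  # number of dictionary words rooted at position 0: (5**5 - 1) // 4
--     for c in word:
--         total += VOWELS.index(c) * w
--         w = max(w // 5, 1)
--     return total
-- ===== Notes on version B (the rewrite author's own statement) =====
-- stated objective: simpler
-- what changed: Replaces the nested per-character while-loop (rebuilding the geometric weight from scratch for every index) and the vowel dict with a single pass that carries the current subtree weight in an accumulator (w = max(w//5,1)) and uses each vowel's alphabet position directly, so the skip-branch for the first vowel and the inner loop disappear.
import Mathlib
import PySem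

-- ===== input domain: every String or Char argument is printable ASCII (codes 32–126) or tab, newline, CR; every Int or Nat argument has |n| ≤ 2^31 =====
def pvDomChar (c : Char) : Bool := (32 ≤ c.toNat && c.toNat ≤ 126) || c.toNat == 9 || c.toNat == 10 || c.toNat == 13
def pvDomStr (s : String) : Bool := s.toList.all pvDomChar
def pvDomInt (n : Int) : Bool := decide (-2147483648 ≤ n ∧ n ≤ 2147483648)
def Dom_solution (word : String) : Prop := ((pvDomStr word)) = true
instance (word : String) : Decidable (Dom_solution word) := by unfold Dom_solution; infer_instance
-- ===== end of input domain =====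

-- B replaces A's per-character inner while-loop and vowel dict with a running weight accumulator: simpler, same cost.

-- ===== PORT A =====
-- the literal dict {'E':1,'I':2,'O':3,'U':4}
def pvVowelDict : PySem.Dict Char Int :=
  PySem.Dict.ofList [('E', 1), ('I', 2), ('O', 3), ('U', 4)]

-- 'while i < 4 - n: added_number = added_number*5 + 1' — counted form of the while loop (runs (4-n).toNat times)
def solution_addedLoop : Nat → Int → Int
  | 0, acc => acc
  | k + 1, acc => solution_addedLoop k (acc * 5 + 1)

-- get_added_number(n, vowel); vowel_dict[vowel] raises KeyError for non-vowels — those inputs are excluded by Pre_solution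
def solution_getAddedNumber (n : Int) (vowel : Char) : Int :=
  solution_addedLoop (4 - n).toNat 1 * (pvVowelDict.getD vowel 0)

def solution (word : String) : Int :=
  (PySem.List.enumerate word.toList 0).foldl
    (fun answer p => if p.2 = 'A' then answer else answer + solution_getAddedNumber p.1 p.2)
    (PySem.Str.len word)

-- ===== PORT B =====
-- "AEIOU".index(c) raises ValueError for non-vowels — excluded by Pre_solution
def solution_alt (word : String) : Int :=
  (word.toList.foldl
    (fun (st : Int × Int) c =>
      (st.1 + (((PySem.List.index? "AEIOU".toList c).getD 0 : Nat) : Int) * st.2,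
       max (PySem.Int.floordiv st.2 5) 1))
    (PySem.Str.len word, 781)).1

-- ===== PRECONDITION & SPEC =====
-- Pre_: exactly the words over the vowel alphabet; on any other character A raises KeyError (and B raises ValueError).
def Pre_solution (word : String) : Prop := word.toList.all (fun c => c ∈ ['A', 'E', 'I', 'O', 'U']) = true
instance (word : String) : Decidable (Pre_solution word) := by unfold Pre_solution; infer_instance

def pvWitness_solution : String := "EIO"

def Spec_solution (word : String) (out : Int) : Prop := out = solution_alt word
instance (word : String) (out : Int) : Decidable (Spec_solution word out) := by unfold Spec_solution; infer_instance

-- ===== CLAIM (what is proved, stated in full; the proofs are below) =====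
def Claim_equal_solution : Prop := ∀ (word : String), Dom_solution word → Pre_solution word → Spec_solution word (solution word)

-- ===== LEMMAS AND PROOFS =====

-- the weight A recomputes for position n (B carries it as its second accumulator component)
def pvWeight (n : Int) : Int := solution_addedLoop (4 - n).toNat 1

lemma pvWeight_step (n : Int) (hn : 0 ≤ n) :
    max (PySem.Int.floordiv (pvWeight n) 5) 1 = pvWeight (n + 1) := by
  rcases (by omega : n = 0 ∨ n = 1 ∨ n = 2 ∨ n = 3 ∨ 4 ≤ n) with h | h | h | h | h
  · subst h; decide
  · subst h; decide
  · subst h; decide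
  · subst h; decide
  · have h1 : (4 - n).toNat = 0 := by omega
    have h2 : (4 - (n + 1)).toNat = 0 := by omega
    simp only [pvWeight, h1, h2, solution_addedLoop]
    decide

lemma fold_eq (l : List Char) (h : ∀ c ∈ l, c ∈ ['A', 'E', 'I', 'O', 'U'])
    (n : Int) (hn : 0 ≤ n) (a : Int) :
    (PySem.List.enumerate l n).foldl
      (fun answer p => if p.2 = 'A' then answer else answer + solution_getAddedNumber p.1 p.2) a
    = (l.foldl
        (fun (st : Int × Int) c =>
          (st.1 + (((PySem.List.index? "AEIOU".toList c).getD 0 : Nat) : Int) * st.2,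
           max (PySem.Int.floordiv st.2 5) 1))
        (a, pvWeight n)).1 := by
  induction l generalizing n a with
  | nil => simp [PySem.List.enumerate]
  | cons c cs ih =>
    rw [PySem.List.enumerate_cons]
    simp only [List.foldl_cons]
    rw [pvWeight_step n hn]
    have hstep :
        (if c = 'A' then a else a + solution_getAddedNumber n c)
        = a + (((PySem.List.index? "AEIOU".toList c).getD 0 : Nat) : Int) * pvWeight n := by
      have hc := h c (List.mem_cons_self)
      fin_cases hc <;>
        simp [solution_getAddedNumber, pvVowelDict, pvWeight, PySem.Dict.getD,
              PySem.List.index?_eq_idxOf?, List.idxOf?, mul_comm] <;>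
        exact Or.inl (by decide)
    rw [hstep, ih (fun c hc => h c (List.mem_cons_of_mem _ hc)) (n + 1) (by omega)]

-- ===== VERDICT (by name: the statement is the Claim_ definition above) =====
theorem solution_spec : Claim_equal_solution := by
  intro word _ hpre
  unfold Spec_solution solution solution_alt
  exact fold_eq word.toList (by simpa [Pre_solution, List.all_eq_true] using hpre) 0 (by norm_num)
    (PySem.Str.len word)
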